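-- pv_equiv track=rewrite | github.com/sravanrekandar/section-binding | src/section_binding.py | calculate_signature_order
-- ===== SOURCE A (Python) =====
-- def calculate_signature_order(total_pages, signature_size):
--     """
--     Calculate the page order for section binding.
--
--     For section binding, pages are arranged so that when printed double-sided
--     and folded, they appear in correct reading order.
--
--     Args:
--         total_pages (int): Total number of pages in the PDF
--         signature_size (int): Number of pages per signature (4, 8, 16, 32)
--
--     Returns:
--         list: Ordered list of page numbers for section binding
--     """
--     # Pad pages to make them divisible by signature size
--     padded_pages = (
--         (total_pages + signature_size - 1) // signature_size
--     ) * signature_size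
--
--     # Create list of pages (1-indexed)
--     pages = list(range(1, total_pages + 1))
--
--     # Add blank pages if needed
--     while len(pages) < padded_pages:
--         pages.append(None)  # None represents blank pages
--
--     # Calculate signature order
--     reordered_pages = []
--
--     # Process each signature
--     for signature_start in range(0, padded_pages, signature_size):
--         # Calculate the correct order for this signature
--         signature_order = []
--
--         for i in range(signature_size // 2):
--             left_page = signature_start + i
--             right_page = signature_start + signature_size - 1 - i
--
--             # Add the pages for this sheet
--             if right_page < len(pages):
--                 signature_order.append(pages[right_page])
--             if left_page < len(pages):
--                 signature_order.append(pages[left_page])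
--
--         reordered_pages.extend(signature_order)
--
--     return [p for p in reordered_pages if p is not None]
-- ===== SOURCE B (Python) =====
-- def calculate_signature_order(total_pages, signature_size):
--     """Rank-and-sort: compute each page's destination index in the bound
--     output directly from arithmetic, then sort the pages by that index."""
--     half = signature_size // 2
--
--     def position(p):
--         s, j = divmod(p - 1, signature_size)
--         if 0 <= j < half:                 # front half of the signature: printed second of its pair
--             return (s * half + j) * 2 + 1
--         i = signature_size - 1 - j
--         if 0 <= i < half:                 # back half: printed first of its pair
--             return (s * half + i) * 2
--         return None                       # middle page of an odd signature: never printed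
--
--     placed = [(position(p), p) for p in range(1, total_pages + 1)]
--     kept = [(k, p) for k, p in placed if k is not None]
--     kept.sort(key=lambda t: t[0])
--     return [p for _, p in kept]
-- ===== Notes on version B (the rewrite author's own statement) =====
-- stated objective: alternative
-- what changed: B replaces A's padded-sentinel list and nested per-signature generation loops with a rank-and-sort algorithm: it computes each page's destination index in the bound output by pure arithmetic (divmod into signature/offset) and sorts the pages by that index.
import Mathlib
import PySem

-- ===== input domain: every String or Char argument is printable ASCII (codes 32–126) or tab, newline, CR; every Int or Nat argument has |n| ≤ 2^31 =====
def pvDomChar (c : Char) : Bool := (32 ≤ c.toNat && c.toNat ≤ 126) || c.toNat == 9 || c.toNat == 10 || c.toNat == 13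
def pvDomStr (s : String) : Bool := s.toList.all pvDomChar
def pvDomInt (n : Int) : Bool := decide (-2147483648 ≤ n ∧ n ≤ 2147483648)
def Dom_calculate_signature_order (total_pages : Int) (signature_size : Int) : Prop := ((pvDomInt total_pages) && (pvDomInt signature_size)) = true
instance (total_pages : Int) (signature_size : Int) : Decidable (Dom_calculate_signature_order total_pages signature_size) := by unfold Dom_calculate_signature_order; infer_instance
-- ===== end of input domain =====

-- B replaces A's padded-sentinel list and nested per-signature generation loops with a
-- rank-and-sort algorithm: each page's destination index is computed arithmetically and
-- the pages are sorted by it (alternative decomposition; no speed claim).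


-- ===== PORT A =====
-- the 'while len(pages) < padded_pages: pages.append(None)' loop of A
def pvPadLoop (pages : List (Option Int)) (padded : Int) : List (Option Int) :=
  if (pages.length : Int) < padded then pvPadLoop (pages ++ [none]) padded else pages
termination_by (padded - pages.length).toNat
decreasing_by simp; omega

def calculate_signature_order (total_pages : Int) (signature_size : Int) : List Int :=
  let padded := (PySem.Int.floordiv (total_pages + signature_size - 1) signature_size) * signature_size
  let pages0 := (PySem.List.pyRange 1 (total_pages + 1) 1).map (fun p => some p)
  let pages := pvPadLoop pages0 padded
  -- pages[right_page] / pages[left_page]: the guard makes the index in range whenever the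
  -- access is reached, so the '.getD none' default of pyGet? is never used
  let reordered := (PySem.List.pyRange 0 padded signature_size).foldl (fun acc signature_start =>
    let signature_order := (PySem.List.pyRange 0 (PySem.Int.floordiv signature_size 2) 1).foldl
      (fun so i =>
        let left_page := signature_start + i
        let right_page := signature_start + signature_size - 1 - i
        let so := if right_page < (pages.length : Int) then so ++ [(PySem.List.pyGet? pages right_page).getD none] else so
        if left_page < (pages.length : Int) then so ++ [(PySem.List.pyGet? pages left_page).getD none] else so)
      []
    acc ++ signature_order) []
  reordered.filterMap id

-- ===== PORT B =====
-- B's helper position(p): destination index of page p, or None for the unprintable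
-- middle page of an odd signature.  divmod(p-1, signature_size) → PySem.Int.divmod?
-- (none = ZeroDivisionError, excluded by Pre_).
def pvPosition (signature_size half p : Int) : Option Int :=
  match PySem.Int.divmod? (p - 1) signature_size with
  | none => none   -- Python raises ZeroDivisionError here; unreachable under Pre_
  | some (s, j) =>
    if 0 ≤ j ∧ j < half then some ((s * half + j) * 2 + 1)
    else
      let i := signature_size - 1 - j
      if 0 ≤ i ∧ i < half then some ((s * half + i) * 2) else none

def calculate_signature_order_alt (total_pages : Int) (signature_size : Int) : List Int :=
  let half := PySem.Int.floordiv signature_size 2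
  let placed := (PySem.List.pyRange 1 (total_pages + 1) 1).map
    (fun p => (pvPosition signature_size half p, p))
  let kept := placed.filterMap (fun t => t.1.map (fun k => (k, t.2)))
  let sortedKept := PySem.List.sorted kept (fun t => t.1) false
  sortedKept.map (fun t => t.2)

-- ===== PRECONDITION & SPEC =====
-- Pre_ excludes exactly signature_size = 0, where Python A raises ZeroDivisionError.
def Pre_calculate_signature_order (total_pages : Int) (signature_size : Int) : Prop :=
  signature_size ≠ 0
instance (total_pages : Int) (signature_size : Int) : Decidable (Pre_calculate_signature_order total_pages signature_size) := by unfold Pre_calculate_signature_order; infer_instance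
def pvWitness_calculate_signature_order : Int × Int := (10, 4)

def Spec_calculate_signature_order (total_pages : Int) (signature_size : Int) (out : List Int) : Prop := out = calculate_signature_order_alt total_pages signature_size
instance (total_pages : Int) (signature_size : Int) (out : List Int) : Decidable (Spec_calculate_signature_order total_pages signature_size out) := by unfold Spec_calculate_signature_order; infer_instance

-- ===== CLAIM (what is proved, stated in full; the proofs are below) =====
def Claim_equal_calculate_signature_order : Prop := ∀ (total_pages : Int) (signature_size : Int), Dom_calculate_signature_order total_pages signature_size → Pre_calculate_signature_order total_pages signature_size → Spec_calculate_signature_order total_pages signature_size (calculate_signature_order total_pages signature_size)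
-- ===== LEMMAS AND PROOFS =====

-- ---------- A-side reduction (A = a flatMap of per-sheet page pairs) ----------

theorem pvPadLoop_eq (pages : List (Option Int)) (padded : Int) :
    pvPadLoop pages padded = pages ++ List.replicate (padded - pages.length).toNat none := by
  fun_induction pvPadLoop pages padded with
  | case1 l h ih =>
      rw [ih, List.append_assoc]
      congr 1
      have h2 : (padded - (↑l.length : Int)).toNat = (padded - ↑(l.length + 1)).toNat + 1 := by
        push_cast; omega
      rw [h2, List.replicate_succ]
      simp
  | case2 l h => simp; omega

theorem pyGet?_pos {α : Type} (xs : List α) {k : Int} (hk : 0 ≤ k) (h : k < (xs.length : Int)) :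
    PySem.List.pyGet? xs k = xs[k.toNat]? := by
  simp [PySem.List.pyGet?, PySem.List.pyIdx?, hk, h]

theorem pages_get (tp P k : Int) (htp : 0 ≤ tp) (hk : 0 ≤ k) (hkP : k < P) :
    (PySem.List.pyGet? (pvPadLoop ((PySem.List.pyRange 1 (tp + 1) 1).map (fun p => some p)) P) k).getD none
      = if k < tp then some (k + 1) else none := by
  rw [pvPadLoop_eq]
  have hlen0 : ((PySem.List.pyRange 1 (tp + 1) 1).map (fun p => (some p : Option Int))).length = tp.toNat := by
    simp [PySem.List.length_pyRange_one]
  rw [pyGet?_pos _ hk (by simp [hlen0]; push_cast; omega)]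
  by_cases hkt : k < tp
  · rw [List.getElem?_append_left (by rw [hlen0]; omega)]
    rw [List.getElem?_map]
    rw [List.getElem?_eq_getElem (by simp [PySem.List.length_pyRange_one]; omega)]
    rw [PySem.List.getElem_pyRange_one]
    rw [if_pos hkt]
    simp only [Option.map_some, Option.getD_some]
    congr 1
    omega
  · rw [List.getElem?_append_right (by rw [hlen0]; omega)]
    rw [List.getElem?_replicate, hlen0]
    rw [if_pos (by push_cast; omega)]
    rw [if_neg hkt]
    rfl

theorem range_mul (N ss : Int) (hss : 0 < ss) :
    PySem.List.pyRange 0 (N * ss) ss = (PySem.List.pyRange 0 N 1).map (fun s => s * ss) := by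
  rw [PySem.List.pyRange_of_pos _ _ hss, PySem.List.pyRange_one, List.map_map]
  by_cases hN : 0 < N
  · have hP : (0:Int) < N * ss := mul_pos hN hss
    rw [if_pos hP]
    have hcnt : (N * ss - 0 + ss - 1) / ss = N := by
      rw [show N * ss - 0 + ss - 1 = (ss - 1) + N * ss by ring,
          Int.add_mul_ediv_right _ _ (ne_of_gt hss),
          Int.ediv_eq_zero_of_lt (by omega) (by omega)]
      ring
    rw [hcnt, show (N - 0).toNat = N.toNat by omega]
    apply List.map_congr_left
    intro x _
    simp
    ring
  · have hnp : ¬ (0:Int) < N * ss := by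
      push_neg at hN ⊢
      exact mul_nonpos_of_nonpos_of_nonneg hN (le_of_lt hss)
    rw [if_neg hnp, show (N - 0).toNat = 0 by omega]
    simp

theorem inner_A (tp ss start P : Int) (pages : List (Option Int)) (hss : 0 < ss)
    (hPlen : (pages.length : Int) = P)
    (hget : ∀ k : Int, 0 ≤ k → k < P →
      (PySem.List.pyGet? pages k).getD none = if k < tp then some (k + 1) else none)
    (h0 : 0 ≤ start) (hP : start + ss ≤ P) :
    ((PySem.List.pyRange 0 (PySem.Int.floordiv ss 2) 1).foldl
      (fun so i =>
        if start + i < (pages.length : Int) then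
          (if start + ss - 1 - i < (pages.length : Int) then
              so ++ [(PySem.List.pyGet? pages (start + ss - 1 - i)).getD none] else so)
            ++ [(PySem.List.pyGet? pages (start + i)).getD none]
        else
          if start + ss - 1 - i < (pages.length : Int) then
            so ++ [(PySem.List.pyGet? pages (start + ss - 1 - i)).getD none] else so)
      []) =
    (PySem.List.pyRange 0 (PySem.Int.floordiv ss 2) 1).flatMap (fun i =>
      [if start + ss - 1 - i < tp then some (start + ss - i) else none,
       if start + i < tp then some (start + i + 1) else none]) := by
  have hh : PySem.Int.floordiv ss 2 = ss / 2 := PySem.Int.floordiv_eq_ediv_of_pos (by norm_num)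
  rw [PySem.List.foldl_congr_mem _ _
      (fun so i => so ++ [if start + ss - 1 - i < tp then some (start + ss - i) else none,
                          if start + i < tp then some (start + i + 1) else none]) [] ?_]
  · exact PySem.List.foldl_append_eq_flatMap _ _ []
  · intro acc i hi
    rw [PySem.List.mem_pyRange_one, hh] at hi
    rw [if_pos (by rw [hPlen]; omega), if_pos (by rw [hPlen]; omega)]
    rw [hget (start + ss - 1 - i) (by omega) (by omega),
        hget (start + i) (by omega) (by omega)]
    rw [List.append_assoc,
        show start + ss - 1 - i + 1 = start + ss - i from by ring]
    rfl

theorem sig_match (tp ss s : Int) :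
    ((PySem.List.pyRange 0 (PySem.Int.floordiv ss 2) 1).flatMap (fun i =>
      [if s * ss + ss - 1 - i < tp then some (s * ss + ss - i) else none,
       if s * ss + i < tp then some (s * ss + i + 1) else none])).filterMap id =
    (PySem.List.pyRange 0 (PySem.Int.floordiv ss 2) 1).flatMap (fun i =>
      (if s * ss + ss - i ≤ tp then [s * ss + ss - i] else []) ++
      (if s * ss + 1 + i ≤ tp then [s * ss + 1 + i] else [])) := by
  rw [List.filterMap_flatMap]
  apply List.flatMap_congr
  intro i _
  split_ifs with h1 h2 h1' h2' <;> simp_all <;> omega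

-- ---------- B-side: the keyed list in A's order ----------

-- the (destination-index, page) pairs in A's emission order
def pvYs (tp ss N half : Int) : List (Int × Int) :=
  (PySem.List.pyRange 0 N 1).flatMap (fun s =>
    (PySem.List.pyRange 0 half 1).flatMap (fun i =>
      (if s * ss + ss - i ≤ tp then [((s * half + i) * 2, s * ss + ss - i)] else []) ++
      (if s * ss + 1 + i ≤ tp then [((s * half + i) * 2 + 1, s * ss + 1 + i)] else [])))

theorem mem_pair_append {α : Type} {x a b : α} {c1 c2 : Prop} [Decidable c1] [Decidable c2] :
    x ∈ (if c1 then [a] else []) ++ (if c2 then [b] else []) ↔ (c1 ∧ x = a) ∨ (c2 ∧ x = b) := by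
  split_ifs <;> simp_all

theorem ys_map_snd (tp ss N half : Int) :
    (pvYs tp ss N half).map Prod.snd =
    (PySem.List.pyRange 0 N 1).flatMap (fun s =>
      (PySem.List.pyRange 0 half 1).flatMap (fun i =>
        (if s * ss + ss - i ≤ tp then [s * ss + ss - i] else []) ++
        (if s * ss + 1 + i ≤ tp then [s * ss + 1 + i] else []))) := by
  unfold pvYs
  rw [List.map_flatMap]
  apply List.flatMap_congr
  intro s _
  rw [List.map_flatMap]
  apply List.flatMap_congr
  intro i _
  split_ifs <;> simp

theorem ys_mem_iff (tp ss N half k p : Int) :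
    (k, p) ∈ pvYs tp ss N half ↔
      ∃ s i, 0 ≤ s ∧ s < N ∧ 0 ≤ i ∧ i < half ∧ p ≤ tp ∧
        ((p = s * ss + ss - i ∧ k = (s * half + i) * 2) ∨
         (p = s * ss + 1 + i ∧ k = (s * half + i) * 2 + 1)) := by
  unfold pvYs
  simp only [List.mem_flatMap, PySem.List.mem_pyRange_one, mem_pair_append, Prod.mk.injEq]
  constructor
  · rintro ⟨s, ⟨hs0, hsN⟩, i, ⟨hi0, hih⟩, h | h⟩
    · exact ⟨s, i, hs0, hsN, hi0, hih, by omega, Or.inl ⟨h.2.2, h.2.1⟩⟩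
    · exact ⟨s, i, hs0, hsN, hi0, hih, by omega, Or.inr ⟨h.2.2, h.2.1⟩⟩
  · rintro ⟨s, i, hs0, hsN, hi0, hih, hptp, h | h⟩
    · exact ⟨s, ⟨hs0, hsN⟩, i, ⟨hi0, hih⟩, Or.inl ⟨by omega, h.2, h.1⟩⟩
    · exact ⟨s, ⟨hs0, hsN⟩, i, ⟨hi0, hih⟩, Or.inr ⟨by omega, h.2, h.1⟩⟩

-- every element of the (s,i) block has key (s*half+i)*2 or (s*half+i)*2+1
theorem block_key (tp ss half s i : Int) (x : Int × Int)
    (hx : x ∈ (if s * ss + ss - i ≤ tp then [((s * half + i) * 2, s * ss + ss - i)] else []) ++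
              (if s * ss + 1 + i ≤ tp then [((s * half + i) * 2 + 1, s * ss + 1 + i)] else [])) :
    x.1 = (s * half + i) * 2 ∨ x.1 = (s * half + i) * 2 + 1 := by
  rw [mem_pair_append] at hx
  rcases hx with ⟨_, rfl⟩ | ⟨_, rfl⟩ <;> simp

theorem ys_pairwise (tp ss N half : Int) (hhalf0 : 0 ≤ half) :
    (pvYs tp ss N half).Pairwise (fun a b => a.1 < b.1) := by
  unfold pvYs
  rw [List.pairwise_flatMap]
  constructor
  · intro s _
    rw [List.pairwise_flatMap]
    constructor
    · intro i _
      split_ifs <;> simp <;> nlinarith [sq_nonneg (s * half + i)]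
    · apply (PySem.List.pairwise_lt_pyRange_one 0 half).imp_of_mem
      intro i i' hi hi' hii' x hx y hy
      rw [PySem.List.mem_pyRange_one] at hi hi'
      have hkx := block_key tp ss half s i x hx
      have hky := block_key tp ss half s i' y hy
      rcases hkx with h | h <;> rcases hky with h' | h' <;> rw [h, h'] <;> nlinarith
  · apply (PySem.List.pairwise_lt_pyRange_one 0 N).imp_of_mem
    intro s s' hs hs' hss' x hx y hy
    rw [List.mem_flatMap] at hx hy
    obtain ⟨i, hi, hx⟩ := hx
    obtain ⟨i', hi', hy⟩ := hy
    rw [PySem.List.mem_pyRange_one] at hi hi'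
    have hkx := block_key tp ss half s i x hx
    have hky := block_key tp ss half s' i' y hy
    have hstep : (s + 1) * half ≤ s' * half :=
      mul_le_mul_of_nonneg_right (by omega) hhalf0
    rcases hkx with h | h <;> rcases hky with h' | h' <;> rw [h, h'] <;> nlinarith

-- ---------- B-side: characterising position(p) ----------

theorem divmod?_eq (a b : Int) (hb : b ≠ 0) :
    PySem.Int.divmod? a b = some (PySem.Int.floordiv a b, PySem.Int.mod a b) := by
  simp only [PySem.Int.divmod?, if_neg hb]
  rfl

theorem pvPosition_eq (ss half p : Int) (hss : ss ≠ 0) :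
    pvPosition ss half p =
      (if 0 ≤ PySem.Int.mod (p - 1) ss ∧ PySem.Int.mod (p - 1) ss < half
        then some ((PySem.Int.floordiv (p - 1) ss * half + PySem.Int.mod (p - 1) ss) * 2 + 1)
        else if 0 ≤ ss - 1 - PySem.Int.mod (p - 1) ss ∧ ss - 1 - PySem.Int.mod (p - 1) ss < half
          then some ((PySem.Int.floordiv (p - 1) ss * half + (ss - 1 - PySem.Int.mod (p - 1) ss)) * 2)
          else none) := by
  unfold pvPosition
  rw [divmod?_eq _ _ hss]

-- floordiv/mod at a point written as s*ss + r, 0 ≤ r < ss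
theorem divmod_at (ss s r : Int) (hss : 0 < ss) (hr0 : 0 ≤ r) (hr : r < ss) :
    PySem.Int.floordiv (s * ss + r) ss = s ∧ PySem.Int.mod (s * ss + r) ss = r := by
  rw [PySem.Int.floordiv_eq_ediv_of_pos hss, PySem.Int.mod_eq_emod_of_pos hss]
  constructor
  · rw [show s * ss + r = r + s * ss by ring, Int.add_mul_ediv_right _ _ (ne_of_gt hss),
        Int.ediv_eq_zero_of_lt hr0 hr]
    ring
  · rw [show s * ss + r = r + s * ss by ring, Int.add_mul_emod_self_right r s ss]
    exact Int.emod_eq_of_lt hr0 hr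

theorem half_bounds (ss : Int) (hss : 0 < ss) :
    2 * PySem.Int.floordiv ss 2 ≤ ss ∧ ss ≤ 2 * PySem.Int.floordiv ss 2 + 1 := by
  rw [PySem.Int.floordiv_eq_ediv_of_pos (by norm_num : (0:Int) < 2)]
  omega

theorem pos_char (ss half p k : Int) (hss : 0 < ss)
    (hhalf : half = PySem.Int.floordiv ss 2) (hp : 1 ≤ p) :
    pvPosition ss half p = some k ↔
      ∃ s i, 0 ≤ s ∧ 0 ≤ i ∧ i < half ∧
        ((p = s * ss + ss - i ∧ k = (s * half + i) * 2) ∨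
         (p = s * ss + 1 + i ∧ k = (s * half + i) * 2 + 1)) := by
  obtain ⟨hb1, hb2⟩ := half_bounds ss hss
  rw [← hhalf] at hb1 hb2
  rw [pvPosition_eq ss half p (ne_of_gt hss)]
  have hj0 : 0 ≤ PySem.Int.mod (p - 1) ss := PySem.Int.mod_nonneg _ hss
  have hjss : PySem.Int.mod (p - 1) ss < ss := PySem.Int.mod_lt _ hss
  have hsum : PySem.Int.floordiv (p - 1) ss * ss + PySem.Int.mod (p - 1) ss = p - 1 :=
    PySem.Int.floordiv_mul_add_mod _ _
  set s0 := PySem.Int.floordiv (p - 1) ss with hs0def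
  set j := PySem.Int.mod (p - 1) ss with hjdef
  have hs00 : 0 ≤ s0 := by
    by_contra hneg
    push_neg at hneg
    have : s0 * ss ≤ (-1) * ss := mul_le_mul_of_nonneg_right (by omega) (le_of_lt hss)
    omega
  constructor
  · intro hk
    by_cases h1 : 0 ≤ j ∧ j < half
    · rw [if_pos h1] at hk
      simp only [Option.some.injEq] at hk
      exact ⟨s0, j, hs00, h1.1, h1.2, Or.inr ⟨by omega, hk.symm⟩⟩
    · rw [if_neg h1] at hk
      by_cases h2 : 0 ≤ ss - 1 - j ∧ ss - 1 - j < half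
      · rw [if_pos h2] at hk
        simp only [Option.some.injEq] at hk
        exact ⟨s0, ss - 1 - j, hs00, h2.1, h2.2, Or.inl ⟨by omega, hk.symm⟩⟩
      · rw [if_neg h2] at hk
        exact absurd hk (by simp)
  · rintro ⟨s, i, hs0, hi0, hih, hcase | hcase⟩
    · -- p = s*ss + ss - i : back-half page, j = ss - 1 - i
      obtain ⟨hpe, hke⟩ := hcase
      have hd := divmod_at ss s (ss - 1 - i) hss (by omega) (by omega)
      have hps : p - 1 = s * ss + (ss - 1 - i) := by omega
      rw [hps] at hs0def hjdef
      have hs0s : s0 = s := by rw [hs0def]; exact hd.1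
      have hjv : j = ss - 1 - i := by rw [hjdef]; exact hd.2
      rw [if_neg (by omega), if_pos (by constructor <;> omega)]
      simp only [Option.some.injEq]
      rw [hke, hs0s, hjv]
      ring
    · -- p = s*ss + 1 + i : front-half page, j = i
      obtain ⟨hpe, hke⟩ := hcase
      have hd := divmod_at ss s i hss hi0 (by omega)
      have hps : p - 1 = s * ss + i := by omega
      rw [hps] at hs0def hjdef
      have hs0s : s0 = s := by rw [hs0def]; exact hd.1
      have hjv : j = i := by rw [hjdef]; exact hd.2
      rw [if_pos (by constructor <;> omega)]
      simp only [Option.some.injEq]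
      rw [hke, hs0s, hjv]

-- ---------- B = pvYs ----------

theorem kept_eq (tp ss half : Int) :
    ((PySem.List.pyRange 1 (tp + 1) 1).map (fun p => (pvPosition ss half p, p))).filterMap
        (fun t => t.1.map (fun k => (k, t.2))) =
    (PySem.List.pyRange 1 (tp + 1) 1).filterMap
        (fun p => (pvPosition ss half p).map (fun k => (k, p))) := by
  rw [List.filterMap_map]
  rfl

theorem kept_mem (tp ss half k p : Int) :
    (k, p) ∈ (PySem.List.pyRange 1 (tp + 1) 1).filterMap
        (fun p => (pvPosition ss half p).map (fun k => (k, p))) ↔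
      (1 ≤ p ∧ p ≤ tp) ∧ pvPosition ss half p = some k := by
  rw [List.mem_filterMap]
  constructor
  · rintro ⟨q, hq, hval⟩
    rw [PySem.List.mem_pyRange_one] at hq
    rcases hv : pvPosition ss half q with _ | k'
    · rw [hv] at hval; simp at hval
    · rw [hv] at hval
      simp only [Option.map_some, Option.some.injEq, Prod.mk.injEq] at hval
      obtain ⟨rfl, rfl⟩ := hval
      exact ⟨⟨by omega, by omega⟩, hv⟩
  · rintro ⟨⟨h1, h2⟩, hv⟩
    exact ⟨p, by rw [PySem.List.mem_pyRange_one]; omega, by rw [hv]; rfl⟩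

theorem kept_nodup (tp ss half : Int) :
    ((PySem.List.pyRange 1 (tp + 1) 1).filterMap
        (fun p => (pvPosition ss half p).map (fun k => (k, p)))).Nodup := by
  rw [List.Nodup, List.pairwise_filterMap]
  apply (PySem.List.pairwise_lt_pyRange_one 1 (tp + 1)).imp_of_mem
  intro p q _ _ hpq x hx y hy
  rcases hvp : pvPosition ss half p with _ | kp
  · rw [hvp] at hx; simp at hx
  · rcases hvq : pvPosition ss half q with _ | kq
    · rw [hvq] at hy; simp at hy
    · rw [hvp] at hx
      rw [hvq] at hy
      simp only [Option.mem_map_of_injective, Option.mem_def, Option.map_some,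
        Option.some.injEq] at hx hy
      intro he
      rw [← hx, ← hy] at he
      have := congrArg Prod.snd he
      simp at this
      omega

theorem ys_nodup (tp ss N half : Int) (hhalf0 : 0 ≤ half) :
    (pvYs tp ss N half).Nodup := by
  have := ys_pairwise tp ss N half hhalf0
  rw [List.Nodup]
  exact this.imp (fun h => by intro he; rw [he] at h; exact lt_irrefl _ h)

theorem kept_perm_ys (tp ss N half : Int) (hss : 0 < ss)
    (hhalf : half = PySem.Int.floordiv ss 2) (htpN : tp ≤ N * ss) :
    (pvYs tp ss N half).Perm
      ((PySem.List.pyRange 1 (tp + 1) 1).filterMap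
        (fun p => (pvPosition ss half p).map (fun k => (k, p)))) := by
  obtain ⟨hb1, hb2⟩ := half_bounds ss hss
  rw [← hhalf] at hb1 hb2
  have hhalf0 : 0 ≤ half := by omega
  apply (List.perm_of_nodup_nodup_toFinset_eq (kept_nodup tp ss half)
    (ys_nodup tp ss N half hhalf0) ?_).symm
  apply Finset.ext
  rintro ⟨k, p⟩
  rw [List.mem_toFinset, List.mem_toFinset, kept_mem, ys_mem_iff]
  constructor
  · rintro ⟨⟨hp1, hp2⟩, hv⟩
    rw [pos_char ss half p k hss hhalf hp1] at hv
    obtain ⟨s, i, hs0, hi0, hih, hc⟩ := hv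
    refine ⟨s, i, hs0, ?_, hi0, hih, hp2, hc⟩
    -- s < N from p ≤ tp ≤ N*ss and s*ss + 1 ≤ p
    have hplow : s * ss + 1 ≤ p := by rcases hc with ⟨he, _⟩ | ⟨he, _⟩ <;> omega
    have : s * ss < N * ss := by omega
    exact lt_of_mul_lt_mul_right (by linarith) (le_of_lt hss)
  · rintro ⟨s, i, hs0, hsN, hi0, hih, hptp, hc⟩
    have hsss : 0 ≤ s * ss := mul_nonneg hs0 (le_of_lt hss)
    have hp1 : 1 ≤ p := by rcases hc with ⟨he, _⟩ | ⟨he, _⟩ <;> omega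
    refine ⟨⟨hp1, hptp⟩, ?_⟩
    rw [pos_char ss half p k hss hhalf hp1]
    exact ⟨s, i, hs0, hi0, hih, hc⟩

theorem alt_eq_ys (tp ss N half : Int) (hss : 0 < ss)
    (hhalf : half = PySem.Int.floordiv ss 2) (htpN : tp ≤ N * ss) :
    calculate_signature_order_alt tp ss = (pvYs tp ss N half).map Prod.snd := by
  obtain ⟨hb1, hb2⟩ := half_bounds ss hss
  rw [← hhalf] at hb1 hb2
  unfold calculate_signature_order_alt
  simp only
  rw [← hhalf, kept_eq]
  exact congrArg (List.map (fun t => t.2))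
    (PySem.List.sorted_eq_of_perm_of_pairwise_lt _ _ (fun t => t.1)
      (kept_perm_ys tp ss N half hss hhalf htpN)
      (ys_pairwise tp ss N half (by omega)))

-- the degenerate side: when half ≤ 0 every position is none, so B returns []
theorem alt_nil_of_half_nonpos (tp ss : Int) (hss : ss ≠ 0)
    (hh : PySem.Int.floordiv ss 2 ≤ 0) :
    calculate_signature_order_alt tp ss = [] := by
  unfold calculate_signature_order_alt
  simp only
  rw [kept_eq]
  have hnil : (PySem.List.pyRange 1 (tp + 1) 1).filterMap
      (fun p => (pvPosition ss (PySem.Int.floordiv ss 2) p).map (fun k => (k, p))) = [] := by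
    rw [List.filterMap_eq_nil_iff]
    intro p _
    rw [pvPosition_eq ss (PySem.Int.floordiv ss 2) p hss]
    rw [if_neg (by omega), if_neg (by omega)]
    rfl
  rw [hnil]
  rfl

-- ===== VERDICT (by name: the statement is the Claim_ definition above) =====
theorem calculate_signature_order_spec : Claim_equal_calculate_signature_order := by
  intro tp ss _ hpre
  have hpre' : ss ≠ 0 := hpre
  unfold Spec_calculate_signature_order
  by_cases hss : 0 < ss
  case neg =>
    -- signature_size < 0: A's inner per-sheet range is empty, B's positions are all none
    have hh : PySem.Int.floordiv ss 2 ≤ 0 := by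
      rw [PySem.Int.floordiv_eq_ediv_of_pos (by norm_num : (0:Int) < 2)]
      omega
    rw [alt_nil_of_half_nonpos tp ss hpre' hh]
    simp only [calculate_signature_order]
    rw [PySem.List.pyRange_one_eq_nil hh]
    simp only [List.foldl_nil]
    simp
  case pos =>
    have hNb := (PySem.Int.floordiv_eq_iff_of_pos (a := tp + ss - 1) (b := ss) hss).mp rfl
    set N := PySem.Int.floordiv (tp + ss - 1) ss with hN
    have hexp : (N + 1) * ss = N * ss + ss := by ring
    by_cases htp : 0 < tp
    case neg =>
      -- total_pages ≤ 0: zero signatures in A, empty page range in B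
      have hN0 : N ≤ 0 := by
        by_contra h
        push_neg at h
        have h1 : ss ≤ N * ss := le_mul_of_one_le_left (le_of_lt hss) h
        linarith [hNb.1]
      have haltnil : calculate_signature_order_alt tp ss = [] := by
        unfold calculate_signature_order_alt
        simp only
        rw [kept_eq, PySem.List.pyRange_one_eq_nil (by omega)]
        rfl
      rw [haltnil]
      simp only [calculate_signature_order]
      rw [range_mul N ss hss, PySem.List.pyRange_one_eq_nil hN0]
      simp
    case pos =>
      have hNpos : 0 < N := by
        by_contra h
        push_neg at h
        have h1 : N * ss ≤ 0 := mul_nonpos_of_nonpos_of_nonneg h (le_of_lt hss)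
        linarith [hNb.2, hexp]
      have htpP : tp ≤ N * ss := by linarith [hNb.2, hexp]
      have hPlen : ((pvPadLoop ((PySem.List.pyRange 1 (tp + 1) 1).map (fun p => some p)) (N * ss)).length : Int) = N * ss := by
        rw [pvPadLoop_eq]
        have h0 : ((PySem.List.pyRange 1 (tp + 1) 1).map (fun p => (some p : Option Int))).length = tp.toNat := by
          simp [PySem.List.length_pyRange_one]
        simp only [List.length_append, List.length_replicate, h0]
        push_cast
        omega
      rw [alt_eq_ys tp ss N (PySem.Int.floordiv ss 2) hss rfl htpP, ys_map_snd]
      simp only [calculate_signature_order]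
      rw [range_mul N ss hss, List.foldl_map]
      rw [PySem.List.foldl_append_eq_flatMap, List.nil_append, List.filterMap_flatMap]
      apply List.flatMap_congr
      intro s hs
      rw [PySem.List.mem_pyRange_one] at hs
      have hlo : 0 ≤ s * ss := mul_nonneg hs.1 (le_of_lt hss)
      have hhi : s * ss + ss ≤ N * ss := by
        have h1 : (s + 1) * ss ≤ N * ss :=
          mul_le_mul_of_nonneg_right (by omega) (le_of_lt hss)
        linarith [h1, show (s + 1) * ss = s * ss + ss from by ring]
      rw [inner_A tp ss (s * ss) (N * ss) _ hss hPlen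
          (fun k hk hkP => pages_get tp (N * ss) k (by omega) hk hkP) hlo hhi]
      exact sig_match tp ss s
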